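-- pv_equiv track=rewrite | github.com/kpas215/Engineering-Computation-2-Final-Project | methodlibrary/parse_data.py | _extract_genres
-- ===== SOURCE A (Python) =====
-- def _extract_genres(genres_field: str):
--     # Extract genre names from the complex format
--     # Input: "[{'id': 16, 'name': 'Animation'}, {'id': 35, 'name': 'Comedy'}]"
--     # Output: "Animation,Comedy"
--
--     genres = []
--     current = ""
--     in_name = False
--
--     i = 0
--     while i < len(genres_field):
--         if i + 6 < len(genres_field) and genres_field[i:i+6] == "'name'":
--             # Found 'name', skip to the value
--             i += 6
--             while i < len(genres_field) and genres_field[i] != "'":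
--                 i += 1
--             i += 1  # Skip opening quote
--
--             # Extract genre name
--             genre_name = ""
--             while i < len(genres_field) and genres_field[i] != "'":
--                 genre_name += genres_field[i]
--                 i += 1
--
--             if genre_name:
--                 genres.append(genre_name)
--         else:
--             i += 1
--
--     return ",".join(genres) if genres else ""
-- ===== SOURCE B (Python) =====
-- def _extract_genres(genres_field: str):
--     # Find-based scan: jump between "'name'" occurrences with str.find instead of
--     # advancing an index character by character.
--     genres = []
--     i = 0
--     n = len(genres_field)
--     while True:
--         j = genres_field.find("'name'", i)
--         if j == -1:
--             break
--         q = genres_field.find("'", j + 6)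
--         if q == -1:
--             break
--         end = genres_field.find("'", q + 1)
--         if end == -1:
--             name = genres_field[q + 1:]
--             i = n
--         else:
--             name = genres_field[q + 1:end]
--             i = end
--         if name:
--             genres.append(name)
--     return ",".join(genres)
-- ===== Notes on version B (the rewrite author's own statement) =====
-- stated objective: faster
-- what changed: B replaces A's hand-rolled character-by-character index loop (manual substring compare plus three nested while loops) by a scan driven by str.find: jump to the next occurrence of the name key, locate the opening and closing quotes with find, and slice the value out.
import Mathlib
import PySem

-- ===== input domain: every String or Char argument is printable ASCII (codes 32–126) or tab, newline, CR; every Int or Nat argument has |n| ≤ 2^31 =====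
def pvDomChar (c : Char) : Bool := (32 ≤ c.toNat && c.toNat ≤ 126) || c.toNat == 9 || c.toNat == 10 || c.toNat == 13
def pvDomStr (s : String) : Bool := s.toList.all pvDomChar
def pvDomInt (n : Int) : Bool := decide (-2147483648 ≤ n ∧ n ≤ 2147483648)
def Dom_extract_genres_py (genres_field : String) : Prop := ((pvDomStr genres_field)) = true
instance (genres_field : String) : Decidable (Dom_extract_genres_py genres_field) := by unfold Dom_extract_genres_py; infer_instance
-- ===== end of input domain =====

-- B replaces A's character-by-character index loop by a str.find-driven scan (measurably faster by a constant factor: C-level find/slice instead of per-character Python steps).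

-- ===== PORT A =====
-- the literal "'name'" as a list of characters
def pvNamePat : List Char := ['\'', 'n', 'a', 'm', 'e', '\'']

-- the predicate of A's inner `while … != "'"` loops
def pvNotQuote : Char → Bool := fun ch => ch != '\''

-- A's outer while-loop, transcribed on the suffix of the string starting at index i
-- (the two inner character loops are the obvious takeWhile/dropWhile over the same suffix).
def pvLoopA : List Char → List (List Char) → List (List Char)
  | [], acc => acc
  | c :: rest, acc =>
    if h : 6 < (c :: rest).length ∧ (c :: rest).take 6 = pvNamePat then
      -- skip to the value's opening quote, then past it
      let t2 := (((c :: rest).drop 6).dropWhile pvNotQuote).drop 1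
      -- extract the genre name (chars up to the closing quote)
      let name := t2.takeWhile pvNotQuote
      pvLoopA (t2.dropWhile pvNotQuote) (acc ++ if name = [] then [] else [name])
    else pvLoopA rest acc
  termination_by t => t.length
  decreasing_by
  · have h1 := List.length_dropWhile_le (p := pvNotQuote) (l := (c :: rest).drop 6)
    have h2 := List.length_dropWhile_le (p := pvNotQuote)
      (l := (((c :: rest).drop 6).dropWhile pvNotQuote).drop 1)
    simp only [List.length_drop, List.length_cons] at *
    omega
  · simp

def extract_genres_py (genres_field : String) : String :=
  let genres := pvLoopA genres_field.toList []
  if genres = [] then "" else String.mk (PySem.Chars.join [','] genres)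

-- ===== PORT B =====
-- B's `while True` find-driven loop; the fuel argument only makes the recursion
-- structural (the index strictly increases, so `length + 1` never runs out).
def pvLoopB (s : List Char) : Nat → Nat → List (List Char) → List (List Char)
  | 0, _, acc => acc
  | fuel + 1, i, acc =>
    let j := PySem.Chars.findFrom s pvNamePat (i : Int) none
    if j = -1 then acc
    else
      let q := PySem.Chars.findFrom s ['\''] (j + 6) none
      if q = -1 then acc
      else
        let e := PySem.Chars.findFrom s ['\''] (q + 1) none
        if e = -1 then
          let name := PySem.Chars.slice s (some (q + 1)) none
          pvLoopB s fuel s.length (acc ++ if name = [] then [] else [name])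
        else
          let name := PySem.Chars.slice s (some (q + 1)) (some e)
          pvLoopB s fuel e.toNat (acc ++ if name = [] then [] else [name])

def extract_genres_py_alt (genres_field : String) : String :=
  let s := genres_field.toList
  String.mk (PySem.Chars.join [','] (pvLoopB s (s.length + 1) 0 []))

-- ===== PRECONDITION & SPEC =====
def Spec_extract_genres_py (genres_field : String) (out : String) : Prop := out = extract_genres_py_alt genres_field
instance (genres_field : String) (out : String) : Decidable (Spec_extract_genres_py genres_field out) := by unfold Spec_extract_genres_py; infer_instance

-- ===== CLAIM (what is proved, stated in full; the proofs are below) =====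
def Claim_equal_extract_genres_py : Prop := ∀ (genres_field : String), Dom_extract_genres_py genres_field → Spec_extract_genres_py genres_field (extract_genres_py genres_field)

-- ===== LEMMAS AND PROOFS =====

theorem pvDropWhile_eq_drop (p : Char → Bool) (t : List Char) :
    t.dropWhile p = t.drop (t.takeWhile p).length := by
  have h := List.drop_left (l₁ := t.takeWhile p) (l₂ := t.dropWhile p)
  rw [List.takeWhile_append_dropWhile] at h
  exact h.symm

-- PySem.Chars.find with a single-character pattern is the takeWhile position
theorem pvFind_quote (t : List Char) :
    PySem.Chars.find t ['\''] =
      if '\'' ∈ t then ((t.takeWhile pvNotQuote).length : Int) else -1 := by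
  by_cases hm : '\'' ∈ t
  · rw [if_pos hm]
    have hinf : ['\''] <:+: t := by
      obtain ⟨u, v, huv⟩ := List.append_of_mem hm
      exact ⟨u, v, by simpa using huv.symm⟩
    have h0 : 0 ≤ PySem.Chars.find t ['\''] := (PySem.Chars.find_nonneg_iff _ _).mpr hinf
    obtain ⟨hpre, hmin⟩ := PySem.Chars.find_spec h0
    set n := (PySem.Chars.find t ['\'']).toNat with hn
    set L := (t.takeWhile pvNotQuote).length with hL
    -- the closing quote is at t[n]
    have hEq : n = L := by
      by_contra hne
      rcases Nat.lt_or_ge n L with hlt | hge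
      · -- n < L: t[n] lies in the takeWhile block, so it is not a quote
        cases hd : t.drop n with
        | nil => rw [hd] at hpre; simp at hpre
        | cons a u =>
          have ha : a = '\'' := by
            rw [hd] at hpre
            exact (List.cons_prefix_cons.mp hpre).1.symm
          have hnlen : n < t.length := by
            have := congrArg List.length hd; simp at this; omega
          have htn : t[n] = a := by
            have hlt0 : 0 < (t.drop n).length := by rw [hd]; simp
            have hge := List.getElem_drop (xs := t) (i := n) (j := 0) (h := hlt0)
            simp only [hd, List.getElem_cons_zero] at hge
            simpa using hge.symm
          have hgeq := List.IsPrefix.getElem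
            (List.takeWhile_prefix (p := pvNotQuote) (l := t)) (by omega : n < L)
          have hptn : pvNotQuote t[n] = true := by
            have := List.mem_takeWhile_imp
              (x := (t.takeWhile pvNotQuote)[n]'(by omega)) (List.getElem_mem _)
            rwa [hgeq] at this
          simp [pvNotQuote, htn, ha] at hptn
      · -- L < n: but t[L] is already a quote, contradicting minimality
        have hdw : t.dropWhile pvNotQuote ≠ [] := by
          intro hnil
          have := List.dropWhile_eq_nil_iff.mp hnil '\'' hm
          simp [pvNotQuote] at this
        have hhead := List.head_dropWhile_not pvNotQuote hdw
        have hq : (t.dropWhile pvNotQuote).head hdw = '\'' := by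
          revert hhead; simp [pvNotQuote]
        have hdwL : t.dropWhile pvNotQuote = t.drop L := by
          rw [hL]; exact pvDropWhile_eq_drop _ _
        have hpref : ['\''] <+: t.drop L := by
          rw [← hdwL]
          cases hd : t.dropWhile pvNotQuote with
          | nil => exact absurd hd hdw
          | cons a u =>
            have : a = '\'' := by
              have hha : (t.dropWhile pvNotQuote).head hdw = a := by
                simp only [hd, List.head_cons]
              rw [← hha, hq]
            rw [this]
            exact ⟨u, rfl⟩
        exact hmin L (by omega) hpref
    rw [← Int.toNat_of_nonneg h0, ← hn, hEq]
  · rw [if_neg hm, PySem.Chars.find_eq_neg_one_iff]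
    intro hinf
    exact hm (hinf.subset (by simp))

-- A's loop returns the accumulator on a suffix too short to contain a match
theorem pvLoopA_short (t : List Char) (acc : List (List Char)) (h : t.length ≤ 6) :
    pvLoopA t acc = acc := by
  induction t generalizing acc with
  | nil => simp [pvLoopA]
  | cons c rest ih =>
    rw [pvLoopA, dif_neg (by simp only [List.length_cons, not_and]; intro h1; simp at h; omega)]
    exact ih _ (by simp at h ⊢; omega)

-- A's loop walks over positions with no "'name'" match without changing anything
theorem pvLoopA_skip (s : List Char) (d i : Nat) (acc : List (List Char))
    (h : ∀ k, i ≤ k → k < i + d → ¬ pvNamePat <+: s.drop k) :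
    pvLoopA (s.drop i) acc = pvLoopA (s.drop (i + d)) acc := by
  induction d generalizing i with
  | zero => simp
  | succ d ih =>
    cases hcr : s.drop i with
    | nil =>
      have hlen : s.length ≤ i := by
        have := congrArg List.length hcr; simp at this; omega
      rw [List.drop_eq_nil_of_le (by omega : s.length ≤ i + (d + 1))]
    | cons c rest =>
      have hrest : rest = s.drop (i + 1) := by
        have hdd : (s.drop i).drop 1 = s.drop (i + 1) := List.drop_drop
        rw [hcr] at hdd; simpa using hdd
      rw [pvLoopA, dif_neg, hrest]
      · rw [ih (i + 1) (fun k hk1 hk2 => h k (by omega) (by omega)),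
            show i + 1 + d = i + (d + 1) from by omega]
      · rintro ⟨-, htake⟩
        exact h i le_rfl (by omega)
          (by rw [List.prefix_iff_eq_take, hcr,
                  show pvNamePat.length = 6 from by decide]
              exact htake.symm)

theorem pvLoopA_nil (acc : List (List Char)) : pvLoopA [] acc = acc := by
  simp [pvLoopA]

-- one step of A's loop at a position where "'name'" matches
theorem pvLoopA_match (t : List Char) (acc : List (List Char))
    (h6 : 6 < t.length) (htake : t.take 6 = pvNamePat) :
    pvLoopA t acc =
      pvLoopA ((((t.drop 6).dropWhile pvNotQuote).drop 1).dropWhile pvNotQuote)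
        (acc ++ if (((t.drop 6).dropWhile pvNotQuote).drop 1).takeWhile pvNotQuote = []
                then [] else [(((t.drop 6).dropWhile pvNotQuote).drop 1).takeWhile pvNotQuote]) := by
  cases t with
  | nil => simp at h6
  | cons c rest => rw [pvLoopA, dif_pos ⟨h6, htake⟩]

-- a prefix occurrence further right is an infix of an earlier suffix
theorem pvInfix_of_prefix_drop (l pat : List Char) (i k : Nat) (hik : i ≤ k)
    (h : pat <+: l.drop k) : pat <:+: l.drop i := by
  obtain ⟨r, hr⟩ := h
  refine ⟨(l.drop i).take (k - i), r, ?_⟩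
  have hdd : (l.drop i).drop (k - i) = l.drop k := by rw [List.drop_drop]; congr 1; omega
  calc (l.drop i).take (k - i) ++ pat ++ r
      = (l.drop i).take (k - i) ++ (pat ++ r) := by simp
    _ = (l.drop i).take (k - i) ++ (l.drop i).drop (k - i) := by rw [hdd, hr]
    _ = l.drop i := by simp

-- main invariant: B's find-loop from index i computes A's loop on the suffix from i
theorem pvMain (s : List Char) (fuel i : Nat) (acc : List (List Char))
    (hi : i ≤ s.length) (hf : s.length - i < fuel) :
    pvLoopB s fuel i acc = pvLoopA (s.drop i) acc := by
  induction fuel generalizing i acc with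
  | zero => omega
  | succ fuel ih =>
    rw [pvLoopB, PySem.Chars.findFrom_natCast s pvNamePat i hi]
    by_cases hf1 : PySem.Chars.find (s.drop i) pvNamePat = -1
    · rw [if_pos hf1]
      simp only [reduceIte]
      have hnopat : ∀ k, i ≤ k → ¬ pvNamePat <+: s.drop k := by
        intro k hk hpk
        exact (PySem.Chars.find_eq_neg_one_iff _ _).mp hf1
          (pvInfix_of_prefix_drop s pvNamePat i k hk hpk)
      calc acc = pvLoopA (s.drop (i + (s.length + 1 - i))) acc := by
            rw [List.drop_eq_nil_of_le (by omega), pvLoopA_nil]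
        _ = pvLoopA (s.drop i) acc := by
            rw [pvLoopA_skip s (s.length + 1 - i) i acc
                (fun k hk1 _ => hnopat k hk1)]
    · rw [if_neg hf1]
      have h0 : 0 ≤ PySem.Chars.find (s.drop i) pvNamePat := by
        rcases (PySem.Chars.neg_one_le_find (s.drop i) pvNamePat).lt_or_eq with h | h
        · omega
        · exact absurd h.symm hf1
      obtain ⟨hpre, hmin⟩ := PySem.Chars.find_spec h0
      set fn := (PySem.Chars.find (s.drop i) pvNamePat).toNat with hfn
      have hfcast : PySem.Chars.find (s.drop i) pvNamePat = (fn : Int) :=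
        (Int.toNat_of_nonneg h0).symm
      have hjne : ¬ ((i : Int) + PySem.Chars.find (s.drop i) pvNamePat = -1) := by
        rw [hfcast]; omega
      rw [if_neg hjne]
      -- the match is at absolute position jn
      set jn := i + fn with hjn
      have hdrop_jn : (s.drop i).drop fn = s.drop jn := by
        rw [List.drop_drop]
      rw [hdrop_jn] at hpre
      have hskipA : pvLoopA (s.drop i) acc = pvLoopA (s.drop jn) acc := by
        rw [pvLoopA_skip s fn i acc (fun k hk1 hk2 => by
          have := hmin (k - i) (by omega)
          rw [List.drop_drop, show i + (k - i) = k from by omega] at this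
          exact this)]
      have hjn6 : jn + 6 ≤ s.length := by
        have h1 := List.IsPrefix.length_le hpre
        simp only [List.length_drop] at h1
        have h2 : pvNamePat.length = 6 := by decide
        rw [h2] at h1
        omega
      have hcast6 : (i : Int) + PySem.Chars.find (s.drop i) pvNamePat + 6 = ((jn + 6 : Nat) : Int) := by
        rw [hfcast]; push_cast; omega
      rw [hcast6, PySem.Chars.findFrom_natCast s ['\''] (jn + 6) hjn6,
          pvFind_quote (s.drop (jn + 6))]
      by_cases hq1 : '\'' ∈ s.drop (jn + 6)
      · rw [if_pos hq1]
        set tw := (s.drop (jn + 6)).takeWhile pvNotQuote with htw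
        have htwne : ¬ ((tw.length : Int) = -1) := by omega
        rw [if_neg htwne,
            if_neg (show ¬ (((jn + 6 : Nat) : Int) + (tw.length : Int) = -1) from by push_cast; omega)]
        -- the opening quote is at absolute position qn
        set qn := jn + 6 + tw.length with hqn
        have hdw_q : (s.drop (jn + 6)).dropWhile pvNotQuote = s.drop qn := by
          rw [pvDropWhile_eq_drop, ← htw, List.drop_drop]
        have hdwne : (s.drop (jn + 6)).dropWhile pvNotQuote ≠ [] := by
          intro hnil
          have := List.dropWhile_eq_nil_iff.mp hnil '\'' hq1
          simp [pvNotQuote] at this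
        have hqn_lt : qn < s.length := by
          rw [hdw_q] at hdwne
          by_cases h3 : s.length ≤ qn
          · exact absurd (List.drop_eq_nil_of_le h3) hdwne
          · omega
        have ht2 : ((s.drop (jn + 6)).dropWhile pvNotQuote).drop 1 = s.drop (qn + 1) := by
          rw [hdw_q, List.drop_drop]
        have hcastq : ((jn + 6 : Nat) : Int) + (tw.length : Int) + 1 = ((qn + 1 : Nat) : Int) := by
          push_cast; omega
        rw [hcastq, PySem.Chars.findFrom_natCast s ['\''] (qn + 1) (by omega),
            pvFind_quote (s.drop (qn + 1))]
        by_cases hq2 : '\'' ∈ s.drop (qn + 1)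
        · rw [if_pos hq2]
          set tw' := (s.drop (qn + 1)).takeWhile pvNotQuote with htw'
          have htwne' : ¬ ((tw'.length : Int) = -1) := by omega
          rw [if_neg htwne']
          -- the closing quote is at absolute position en
          set en := qn + 1 + tw'.length with hen
          have hdw_e : (s.drop (qn + 1)).dropWhile pvNotQuote = s.drop en := by
            rw [pvDropWhile_eq_drop, ← htw', List.drop_drop]
          have hdwne' : (s.drop (qn + 1)).dropWhile pvNotQuote ≠ [] := by
            intro hnil
            have := List.dropWhile_eq_nil_iff.mp hnil '\'' hq2
            simp [pvNotQuote] at this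
          have hen_lt : en < s.length := by
            rw [hdw_e] at hdwne'
            by_cases h3 : s.length ≤ en
            · exact absurd (List.drop_eq_nil_of_le h3) hdwne'
            · omega
          have hcaste : ((qn + 1 : Nat) : Int) + (tw'.length : Int) = ((en : Nat) : Int) := by
            push_cast; omega
          rw [hcaste, if_neg (show ¬ (((en : Nat) : Int) = -1) from by omega)]
          have hslice : PySem.Chars.slice s (some ((qn + 1 : Nat) : Int)) (some ((en : Nat) : Int))
              = tw' := by
            rw [PySem.Chars.slice_eq_listSlice, PySem.List.slice_natCast,
                show en - (qn + 1) = tw'.length from by omega]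
            exact (List.prefix_iff_eq_take.mp (List.takeWhile_prefix pvNotQuote)).symm
          have htoNat : ((en : Nat) : Int).toNat = en := by omega
          rw [hslice, htoNat, ih en _ (by omega) (by omega)]
          rw [hskipA, pvLoopA_match (s.drop jn) acc (by simp; omega)
              (by rw [List.prefix_iff_eq_take.mp hpre, show pvNamePat.length = 6 from by decide])]
          rw [List.drop_drop, ht2, ← htw', hdw_e]
        · rw [if_neg hq2]
          simp only [reduceIte]
          have hslice : PySem.Chars.slice s (some ((qn + 1 : Nat) : Int)) none
              = s.drop (qn + 1) := by
            rw [PySem.Chars.slice_eq_listSlice, PySem.List.slice_from_natCast]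
          have htwself : (s.drop (qn + 1)).takeWhile pvNotQuote = s.drop (qn + 1) := by
            rw [List.takeWhile_eq_self_iff]
            intro x hx
            simp only [pvNotQuote, bne_iff_ne, ne_eq]
            intro hxq
            exact hq2 (hxq ▸ hx)
          have hdwnil : (s.drop (qn + 1)).dropWhile pvNotQuote = [] := by
            rw [List.dropWhile_eq_nil_iff]
            intro x hx
            simp only [pvNotQuote, bne_iff_ne, ne_eq]
            intro hxq
            exact hq2 (hxq ▸ hx)
          rw [hslice, ih s.length _ le_rfl (by omega)]
          rw [List.drop_eq_nil_of_le le_rfl, pvLoopA_nil]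
          rw [hskipA, pvLoopA_match (s.drop jn) acc (by simp; omega)
              (by rw [List.prefix_iff_eq_take.mp hpre, show pvNamePat.length = 6 from by decide])]
          rw [List.drop_drop, ht2, htwself, hdwnil, pvLoopA_nil]
      · rw [if_neg hq1]
        simp only [reduceIte]
        have hdwnil : (s.drop (jn + 6)).dropWhile pvNotQuote = [] := by
          rw [List.dropWhile_eq_nil_iff]
          intro x hx
          simp only [pvNotQuote, bne_iff_ne, ne_eq]
          intro hxq
          exact hq1 (hxq ▸ hx)
        rw [hskipA]
        rcases Nat.lt_or_ge (jn + 6) s.length with hlt | hge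
        · rw [pvLoopA_match (s.drop jn) acc (by simp; omega)
              (by rw [List.prefix_iff_eq_take.mp hpre, show pvNamePat.length = 6 from by decide])]
          rw [List.drop_drop, hdwnil]
          simp [pvLoopA_nil]
        · rw [pvLoopA_short _ _ (by simp; omega)]

-- ===== VERDICT (by name: the statement is the Claim_ definition above) =====
theorem extract_genres_py_spec : Claim_equal_extract_genres_py := by
  intro gf _
  unfold Spec_extract_genres_py extract_genres_py extract_genres_py_alt
  simp only []
  rw [pvMain _ _ 0 [] (by omega) (by omega), List.drop_zero]
  cases hg : pvLoopA gf.toList [] with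
  | nil => simp [PySem.Chars.join, List.intercalate]; rfl
  | cons a l => simp
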